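-- pv_equiv track=rewrite | github.com/Wpawlina/AGH-DSA-Course | kolokwia/dynamiki i zachłanne/kintersect/zad3.py | kintersect2
-- ===== SOURCE A (Python) =====
-- def kintersect2( A, k ):
-- 	n = len(A)
-- 	longest = 0
-- 	res_spans = []
--
-- 	if k == 1:
-- 		for i in range(n):
-- 			if A[i][1] - A[i][0] > longest:
-- 				longest = A[i][1] - A[i][0]
-- 				res_spans = [i]
-- 	else:
-- 		for i in range(n):
-- 			A[i] = A[i], i
-- 		A.sort(key=lambda tup: tup[0][1], reverse=True)
--
-- 		for i in range(n):
-- 			spans = [A[i][1]]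
-- 			for j in range(n):
-- 				if i == j or A[j][0][0] > A[i][0][0]: continue
-- 				spans.append(A[j][1])
-- 				if len(spans) == k: break
--
-- 			if len(spans) < k: continue
--
-- 			length = min(A[i][0][1], A[j][0][1]) - A[i][0][0]
-- 			if length > longest:
-- 				longest = length
-- 				res_spans = spans
--
-- 	return res_spans
-- ===== SOURCE B (Python) =====
-- from bisect import insort
--
--
-- def kintersect2(A, k):
--     n = len(A)
--     if k == 1:
--         if n == 0:
--             return []
--         b = max(range(n), key=lambda i: A[i][1] - A[i][0])
--         return [b] if A[b][1] - A[b][0] > 0 else []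
--     if k < 1 or k > n:
--         return []
--     # positions: indices sorted by end descending (stable)
--     order = sorted(range(n), key=lambda i: A[i][1], reverse=True)
--     start = [A[i][0] for i in order]
--     end = [A[i][1] for i in order]
--     bystart = sorted(range(n), key=lambda p: start[p])
--     best_len, best_p = 0, -1
--     Qk = []  # the k smallest positions among those with start <= current start
--     i = 0
--     while i < n:
--         s = start[bystart[i]]
--         j = i
--         while j < n and start[bystart[j]] == s:
--             insort(Qk, bystart[j])
--             if len(Qk) > k:
--                 Qk.pop()
--             j += 1
--         if len(Qk) == k:
--             for t in range(i, j):
--                 p = bystart[t]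
--                 last = Qk[k - 1] if p < Qk[k - 1] else Qk[k - 2]
--                 length = min(end[p], end[last]) - s
--                 if length > best_len or (length == best_len and 0 <= best_p and p < best_p):
--                     best_len, best_p = length, p
--         i = j
--     if best_p < 0:
--         return []
--     s = start[best_p]
--     spans = [order[best_p]]
--     for q in range(n):
--         if q != best_p and start[q] <= s:
--             spans.append(order[q])
--             if len(spans) == k:
--                 break
--     return spans
-- ===== Notes on version B (the rewrite author's own statement) =====
-- stated objective: faster
-- what changed: Instead of A's nested anchor-by-anchor rescan of all intervals, B sorts positions once, sweeps them in ascending start order maintaining the k smallest positions seen so far (bisect-insert into a k-capped sorted list), picks the best anchor during the sweep, and reconstructs the winning span list with one final pass.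
-- intended difference: On k <= 0 with a nonempty list whose minimum start lies below every end, A reads the leftover inner-loop variable j = n-1 after a loop that never breaks and returns an accidental nonempty list of indices, while B returns [] (no k >= 1 intervals requested), the intended value. — e.g. on kintersect2([(0, 1)], 0): A returns [0], B returns []
import Mathlib
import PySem

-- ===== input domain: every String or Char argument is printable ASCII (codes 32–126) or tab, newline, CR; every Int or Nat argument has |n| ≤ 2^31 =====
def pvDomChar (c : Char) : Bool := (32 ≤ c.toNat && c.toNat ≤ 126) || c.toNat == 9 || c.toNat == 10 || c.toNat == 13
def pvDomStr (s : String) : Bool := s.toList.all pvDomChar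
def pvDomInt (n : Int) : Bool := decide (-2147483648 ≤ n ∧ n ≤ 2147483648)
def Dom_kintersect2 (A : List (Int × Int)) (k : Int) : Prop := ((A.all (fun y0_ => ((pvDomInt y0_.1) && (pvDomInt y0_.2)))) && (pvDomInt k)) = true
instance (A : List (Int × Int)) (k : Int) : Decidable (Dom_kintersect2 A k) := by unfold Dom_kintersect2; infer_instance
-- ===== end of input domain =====

-- B replaces A's quadratic anchor×scan nest by: sort positions once, sweep them in ascending start
-- order maintaining the k smallest positions seen, and reconstruct the winning spans once at the end.
-- Python A mutates its argument in place (decorates and sorts it) when k != 1; B does not.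
-- The equivalence proved here is about the RETURN value only.
-- ===== PORT A =====
-- A mutates its argument in Python (decorates and sorts it in place); the equivalence here is about the RETURN value only.
-- inner 'for j in range(n)' loop of A with its break; jlast is the loop variable's last value
def kintersect2_innerA (L : List ((Int × Int) × Int)) (i k : Int)
    (spans : List Int) (jlast : Int) : List Int → List Int × Int
  | [] => (spans, jlast)
  | j :: js =>
    if i = j ∨ (PySem.List.pyGetD L j ((0, 0), 0)).1.1 > (PySem.List.pyGetD L i ((0, 0), 0)).1.1 then
      kintersect2_innerA L i k spans j js
    else
      let spans' := spans ++ [(PySem.List.pyGetD L j ((0, 0), 0)).2]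
      if PySem.List.len spans' = k then (spans', j)
      else kintersect2_innerA L i k spans' j js

def kintersect2 (A : List (Int × Int)) (k : Int) : List Int :=
  let n := PySem.List.len A
  if k = 1 then
    ((PySem.List.pyRange 0 n 1).foldl (fun (st : Int × List Int) i =>
      let ai := PySem.List.pyGetD A i (0, 0)
      if ai.2 - ai.1 > st.1 then (ai.2 - ai.1, [i]) else st) (0, [])).2
  else
    let dec := (PySem.List.pyRange 0 n 1).map (fun i => (PySem.List.pyGetD A i (0, 0), i))
    let L := PySem.List.sorted dec (fun t => t.1.2) true
    ((PySem.List.pyRange 0 n 1).foldl (fun (st : Int × List Int) i =>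
      let r := kintersect2_innerA L i k [(PySem.List.pyGetD L i ((0, 0), 0)).2] 0 (PySem.List.pyRange 0 n 1)
      if PySem.List.len r.1 < k then st
      else
        let length := min (PySem.List.pyGetD L i ((0, 0), 0)).1.2 (PySem.List.pyGetD L r.2 ((0, 0), 0)).1.2
            - (PySem.List.pyGetD L i ((0, 0), 0)).1.1
        if length > st.1 then (length, r.1) else st) (0, [])).2

-- ===== PORT B =====
-- 'insort(Qk, p); if len(Qk) > k: Qk.pop()' — bisect.insort is ported as Mathlib's ordered insertion
def kintersect2_push (k : Int) (Qk : List Int) (p : Int) : List Int :=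
  let Q' := List.orderedInsert (· ≤ ·) p Qk
  if PySem.List.len Q' > k then Q'.dropLast else Q'

-- body of B's 'for t in range(i, j)' candidate loop
def kintersect2_cand (endv : List Int) (k s : Int) (Qk : List Int) (best : Int × Int) (p : Int) : Int × Int :=
  let last := if p < PySem.List.pyGetD Qk (k - 1) 0 then PySem.List.pyGetD Qk (k - 1) 0
              else PySem.List.pyGetD Qk (k - 2) 0
  let length := min (PySem.List.pyGetD endv p 0) (PySem.List.pyGetD endv last 0) - s
  if length > best.1 ∨ (length = best.1 ∧ 0 ≤ best.2 ∧ p < best.2) then (length, p) else best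

-- B's outer 'while i < n' sweep, one equal-start group per step
def kintersect2_sweep (startv endv : List Int) (k : Int) :
    List Int → List Int → Int × Int → Int × Int
  | [], _, best => best
  | p0 :: rest, Qk, best =>
    let s := PySem.List.pyGetD startv p0 0
    let grp := p0 :: rest.takeWhile (fun p => PySem.List.pyGetD startv p 0 = s)
    let rest' := rest.dropWhile (fun p => PySem.List.pyGetD startv p 0 = s)
    let Qk' := grp.foldl (kintersect2_push k) Qk
    let best' := if PySem.List.len Qk' = k then grp.foldl (kintersect2_cand endv k s Qk') best else best
    kintersect2_sweep startv endv k rest' Qk' best'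
termination_by l => (match l with | l => l.length)
decreasing_by
  simp only [List.length_cons]
  exact Nat.lt_succ_of_le (List.length_dropWhile_le _ _)

-- B's final reconstruction loop with its break
def kintersect2_recon (startv order : List Int) (k s bp : Int)
    (spans : List Int) : List Int → List Int
  | [] => spans
  | q :: qs =>
    if q ≠ bp ∧ PySem.List.pyGetD startv q 0 ≤ s then
      let spans' := spans ++ [PySem.List.pyGetD order q 0]
      if PySem.List.len spans' = k then spans'
      else kintersect2_recon startv order k s bp spans' qs
    else kintersect2_recon startv order k s bp spans qs

def kintersect2_alt (A : List (Int × Int)) (k : Int) : List Int :=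
  let n := PySem.List.len A
  if k = 1 then
    if n = 0 then []
    else
      match PySem.List.max? (PySem.List.pyRange 0 n 1)
          (fun i => (PySem.List.pyGetD A i (0, 0)).2 - (PySem.List.pyGetD A i (0, 0)).1) with
      | none => []   -- unreachable: n ≠ 0
      | some b =>
        if (PySem.List.pyGetD A b (0, 0)).2 - (PySem.List.pyGetD A b (0, 0)).1 > 0 then [b] else []
  else if k < 1 ∨ k > n then []
  else
    let order := PySem.List.sorted (PySem.List.pyRange 0 n 1) (fun i => (PySem.List.pyGetD A i (0, 0)).2) true
    let startv := order.map (fun i => (PySem.List.pyGetD A i (0, 0)).1)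
    let endv := order.map (fun i => (PySem.List.pyGetD A i (0, 0)).2)
    let bystart := PySem.List.sorted (PySem.List.pyRange 0 n 1) (fun p => PySem.List.pyGetD startv p 0) false
    let best := kintersect2_sweep startv endv k bystart [] (0, -1)
    if best.2 < 0 then []
    else
      let s := PySem.List.pyGetD startv best.2 0
      kintersect2_recon startv order k s best.2 [PySem.List.pyGetD order best.2 0] (PySem.List.pyRange 0 n 1)

-- ===== PRECONDITION & SPEC =====
-- On k ≤ 0 (an input asking for at most zero intervals) A's inner loop never breaks and A reads the
-- leftover loop variable j = n-1, returning a nonempty accidental list whenever some start is below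
-- every end; B returns [] there, the intended value for a nonsensical k.
def D_kintersect2 (A : List (Int × Int)) (k : Int) : Prop :=
  k ≤ 0 ∧ A ≠ [] ∧ ∃ p ∈ A, ∀ q ∈ A, p.1 < q.2
instance (A : List (Int × Int)) (k : Int) : Decidable (D_kintersect2 A k) := by
  unfold D_kintersect2; infer_instance
def Spec_kintersect2 (A : List (Int × Int)) (k : Int) (out : List Int) : Prop :=
  ¬ D_kintersect2 A k → out = kintersect2_alt A k
instance (A : List (Int × Int)) (k : Int) (out : List Int) : Decidable (Spec_kintersect2 A k out) := by
  unfold Spec_kintersect2; infer_instance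
def pvDiffWitness_kintersect2 : (List (Int × Int)) × Int := ([(0, 1)], 0)
def pvDiffWitnessOut_kintersect2 : (List Int) × (List Int) := ([0], [])

-- ===== CLAIM (what is proved, stated in full; the proofs are below) =====
def Claim_unchanged_kintersect2 : Prop := ∀ (A : List (Int × Int)) (k : Int), Dom_kintersect2 A k → Spec_kintersect2 A k (kintersect2 A k)
def Claim_changed_kintersect2 : Prop := Dom_kintersect2 (pvDiffWitness_kintersect2.1) (pvDiffWitness_kintersect2.2) ∧ D_kintersect2 (pvDiffWitness_kintersect2.1) (pvDiffWitness_kintersect2.2) ∧ kintersect2 (pvDiffWitness_kintersect2.1) (pvDiffWitness_kintersect2.2) = pvDiffWitnessOut_kintersect2.1 ∧ kintersect2_alt (pvDiffWitness_kintersect2.1) (pvDiffWitness_kintersect2.2) = pvDiffWitnessOut_kintersect2.2 ∧ pvDiffWitnessOut_kintersect2.1 ≠ pvDiffWitnessOut_kintersect2.2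
def Claim_exact_kintersect2 : Prop := ∀ (A : List (Int × Int)) (k : Int), Dom_kintersect2 A k → D_kintersect2 A k → kintersect2 A k ≠ kintersect2_alt A k

-- ===== LEMMAS AND PROOFS =====

-- ---------- proof-side abbreviations (used only below the claim block) ----------
def pvR (A : List (Int × Int)) : List Int := PySem.List.pyRange 0 (PySem.List.len A) 1
def pvF (A : List (Int × Int)) : Int → (Int × Int) × Int := fun i => (PySem.List.pyGetD A i (0, 0), i)
def pvOrder (A : List (Int × Int)) : List Int :=
  PySem.List.sorted (pvR A) (fun i => (PySem.List.pyGetD A i (0, 0)).2) true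
def pvL (A : List (Int × Int)) : List ((Int × Int) × Int) :=
  PySem.List.sorted ((pvR A).map (pvF A)) (fun t => t.1.2) true
def pvStartv (A : List (Int × Int)) : List Int := (pvOrder A).map (fun i => (PySem.List.pyGetD A i (0, 0)).1)
def pvEndv (A : List (Int × Int)) : List Int := (pvOrder A).map (fun i => (PySem.List.pyGetD A i (0, 0)).2)
def pvBystart (A : List (Int × Int)) : List Int :=
  PySem.List.sorted (pvR A) (fun p => PySem.List.pyGetD (pvStartv A) p 0) false
def pvStf (A : List (Int × Int)) (p : Int) : Int := PySem.List.pyGetD (pvStartv A) p 0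
def pvEnf (A : List (Int × Int)) (p : Int) : Int := PySem.List.pyGetD (pvEndv A) p 0
def pvIdx (A : List (Int × Int)) (p : Int) : Int := PySem.List.pyGetD (pvOrder A) p 0
def pvQ (A : List (Int × Int)) (p : Int) : List Int :=
  (pvR A).filter (fun q => decide (pvStf A q ≤ pvStf A p))
def pvQual (A : List (Int × Int)) (p : Int) : List Int :=
  (pvR A).filter (fun q => decide (¬ (p = q ∨ pvStf A q > pvStf A p)))
abbrev pvReached (A : List (Int × Int)) (k : Int) (p : Int) : Prop := k ≤ ((pvQ A p).length : Int)
def pvLast (A : List (Int × Int)) (k p : Int) : Int :=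
  if p < PySem.List.pyGetD (pvQ A p) (k - 1) 0 then PySem.List.pyGetD (pvQ A p) (k - 1) 0
  else PySem.List.pyGetD (pvQ A p) (k - 2) 0
def pvLen (A : List (Int × Int)) (k p : Int) : Int :=
  min (pvEnf A p) (pvEnf A (pvLast A k p)) - pvStf A p
def pvSpans (A : List (Int × Int)) (k p : Int) : List Int :=
  pvIdx A p :: ((pvQual A p).take (k - 1).toNat).map (pvIdx A)
def pvUpdA (A : List (Int × Int)) (k : Int) (st : Int × List Int) (p : Int) : Int × List Int :=
  if pvLen A k p > st.1 then (pvLen A k p, pvSpans A k p) else st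
def pvUpdB (A : List (Int × Int)) (k : Int) (b : Int × Int) (p : Int) : Int × Int :=
  if pvLen A k p > b.1 ∨ (pvLen A k p = b.1 ∧ 0 ≤ b.2 ∧ p < b.2) then (pvLen A k p, p) else b
def pvGA (A : List (Int × Int)) (k : Int) (st : Int × List Int) (p : Int) : Int × List Int :=
  if pvReached A k p then pvUpdA A k st p else st
def pvGB (A : List (Int × Int)) (k : Int) (b : Int × Int) (p : Int) : Int × Int :=
  if pvReached A k p then pvUpdB A k b p else b
def pvAscL (A : List (Int × Int)) (P : List Int) : List Int :=
  (pvR A).filter (fun q => P.contains q)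

-- ---------- generic list lemmas ----------
theorem pv_getD_map {α β : Type} (l : List α) (f : α → β) (p : Int) (d : β) (d' : α)
    (h0 : 0 ≤ p) (h1 : p < (l.length : Int)) :
    PySem.List.pyGetD (l.map f) p d = f (PySem.List.pyGetD l p d') := by
  rw [PySem.List.pyGetD_eq_getElem (l.map f) d h0 (by simpa using h1),
      PySem.List.pyGetD_eq_getElem l d' h0 h1]
  simp

theorem pv_insertBy_map {α β : Type} (before : β → β → Bool) (f : α → β) (x : α) (l : List α) :
    PySem.List.insertBy before (f x) (l.map f)
      = (PySem.List.insertBy (fun a b => before (f a) (f b)) x l).map f := by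
  induction l with
  | nil => simp [PySem.List.insertBy]
  | cons y ys ih =>
    simp only [List.map_cons, PySem.List.insertBy]
    split <;> simp [ih]

theorem pv_sorted_map {α β κ : Type} [LT κ] [DecidableLT κ] (f : α → β) (key : β → κ) (rev : Bool)
    (l : List α) :
    PySem.List.sorted (l.map f) key rev = (PySem.List.sorted l (fun a => key (f a)) rev).map f := by
  have aux : ∀ (B : β → β → Bool) (l : List α) (acc : List α),
      List.foldl (fun acc x => PySem.List.insertBy B x acc) (acc.map f) (l.map f)
        = (List.foldl (fun acc x => PySem.List.insertBy (fun a b => B (f a) (f b)) x acc) acc l).map f := by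
    intro B l
    induction l with
    | nil => intro acc; simp
    | cons y ys ih =>
      intro acc
      simp only [List.map_cons, List.foldl_cons]
      rw [pv_insertBy_map, ih]
  cases rev
  · rw [PySem.List.sorted_eq_foldl_insertBy, PySem.List.sorted_eq_foldl_insertBy]
    exact aux _ l []
  · rw [PySem.List.sorted_rev_eq_foldl_insertBy, PySem.List.sorted_rev_eq_foldl_insertBy]
    exact aux _ l []

theorem pv_take_dropLast (l : List Int) (n : Nat) (h : n ≤ l.length) :
    (l.take n).dropLast = l.take (n - 1) := by
  rw [List.dropLast_eq_take, List.length_take, List.take_take]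
  congr 1
  omega

theorem pv_push_take_nat (K : Nat) (Q : List Int) (p : Int) :
    (if K < (List.orderedInsert (· ≤ ·) p (Q.take K)).length
     then (List.orderedInsert (· ≤ ·) p (Q.take K)).dropLast
     else List.orderedInsert (· ≤ ·) p (Q.take K))
      = (List.orderedInsert (· ≤ ·) p Q).take K := by
  induction Q generalizing K with
  | nil =>
    cases K with
    | zero => simp [List.orderedInsert]
    | succ K' => simp [List.orderedInsert]
  | cons x t ih =>
    cases K with
    | zero => simp [List.orderedInsert]
    | succ K' =>
      simp only [List.take_succ_cons, List.orderedInsert]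
      by_cases hpx : p ≤ x
      · simp only [if_pos hpx]
        by_cases hK : K' ≤ t.length
        · have hlen : (List.take K' t).length = K' := by
            rw [List.length_take]; omega
          rw [if_pos (by simp [hlen])]
          simp only [List.take_succ_cons]
          cases hK0 : K' with
          | zero => simp
          | succ KK =>
            subst hK0
            have hne : List.take (KK + 1) t ≠ [] := by
              intro hcon
              have := congrArg List.length hcon
              rw [hlen] at this
              simp at this
            rw [List.dropLast_cons₂, List.dropLast_cons_of_ne_nil hne,
              pv_take_dropLast t (KK + 1) (by omega)]
            simp
        · have hlen : (List.take K' t).length = t.length := by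
            rw [List.length_take]; omega
          rw [if_neg (by simp [hlen]; omega)]
          simp only [List.take_succ_cons]
          rw [List.take_of_length_le (by omega), List.take_of_length_le (by simp; omega)]
      · simp only [if_neg hpx]
        simp only [List.take_succ_cons]
        have hnn : List.orderedInsert (· ≤ ·) p (List.take K' t) ≠ [] := by
          intro hcon
          have := congrArg List.length hcon
          rw [List.orderedInsert_length] at this
          simp at this
        by_cases hc : K' < (List.orderedInsert (· ≤ ·) p (List.take K' t)).length
        · rw [if_pos (by simp; omega)]
          rw [List.dropLast_cons_of_ne_nil hnn]
          rw [← ih K']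
          rw [if_pos hc]
        · rw [if_neg (by simp; omega)]
          rw [← ih K']
          rw [if_neg hc]


theorem pv_filter_append_singleton_perm (l : List Int) (hl : l.Nodup) (P : List Int) (p : Int)
    (hp : p ∈ l) (hnp : p ∉ P) :
    (l.filter (fun q => (P ++ [p]).contains q)).Perm (p :: l.filter (fun q => P.contains q)) := by
  induction l with
  | nil => simp at hp
  | cons x t ih =>
    rcases List.nodup_cons.mp hl with ⟨hxt, hnd⟩
    by_cases hxp : x = p
    · subst hxp
      have hnt : x ∉ t := hxt
      have hfil1 : t.filter (fun q => (P ++ [x]).contains q) = t.filter (fun q => P.contains q) := by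
        apply List.filter_congr
        intro q hq
        have hqx : q ≠ x := fun h => hnt (h ▸ hq)
        simp [List.contains_append, hqx]
      have hPx : (P ++ [x]).contains x = true := by simp [List.contains_append]
      have hPx' : P.contains x = false := by simpa using hnp
      rw [List.filter_cons, List.filter_cons, hPx, hPx', hfil1]
      simp
    · have hpt : p ∈ t := by
        rcases List.mem_cons.mp hp with h | h
        · exact absurd h.symm hxp
        · exact h
      have hcongr : ((P ++ [p]).contains x) = (P.contains x) := by
        simp [List.contains_append, hxp, Ne.symm hxp]
      rw [List.filter_cons, List.filter_cons, hcongr]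
      by_cases hPmem : P.contains x = true
      · rw [hPmem]
        simp only [if_pos rfl]
        exact ((ih hnd hpt).cons x).trans (List.Perm.swap p x _)
      · have : P.contains x = false := by simpa using hPmem
        rw [this]
        simp only [Bool.false_eq_true, if_false]
        exact ih hnd hpt


theorem pv_rank (Q : List Int) (p : Int) (m : Nat) (hp : Q.Pairwise (· < ·)) (hmem : p ∈ Q)
    (hm : 2 ≤ m) (hlen : m ≤ Q.length) :
    (Q.filter (fun q => decide (¬ p = q))).getD (m - 2) 0
      = if p < Q.getD (m - 1) 0 then Q.getD (m - 1) 0 else Q.getD (m - 2) 0 := by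
  obtain ⟨m', rfl⟩ : ∃ m', m = m' + 2 := ⟨m - 2, by omega⟩
  clear hm
  induction Q generalizing m' with
  | nil => simp at hmem
  | cons h t ih =>
    rcases List.pairwise_cons.mp hp with ⟨hht, hpt⟩
    simp only [List.length_cons] at hlen
    by_cases hph : p = h
    · subst hph
      have hm' : m' < t.length := by omega
      have hcond : p < t.getD m' 0 := by
        rw [List.getD_eq_getElem t 0 hm']
        exact hht _ (List.getElem_mem hm')
      have hfil : (p :: t).filter (fun q => decide (¬ p = q)) = t := by
        rw [List.filter_cons]
        have h1 : (decide (¬ p = p)) = false := by simp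
        rw [h1]
        simp only [Bool.false_eq_true, if_false]
        apply List.filter_eq_self.mpr
        intro a ha
        have := hht a ha
        simp only [decide_eq_true_eq]
        omega
      rw [hfil, (show m' + 2 - 2 = m' from rfl), (show m' + 2 - 1 = m' + 1 from rfl),
        List.getD_cons_succ, if_pos hcond]
    · have hpt'' : p ∈ t := by
        rcases List.mem_cons.mp hmem with h' | h'
        · exact absurd h' hph
        · exact h'
      have hfc : (h :: t).filter (fun q => decide (¬ p = q))
          = h :: t.filter (fun q => decide (¬ p = q)) := by
        rw [List.filter_cons]
        have h1 : (decide (¬ p = h)) = true := by simp [hph]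
        rw [h1]
        simp
      rw [hfc]
      cases m' with
      | zero =>
        obtain ⟨a, t', rfl⟩ : ∃ a t', t = a :: t' := by
          cases t with
          | nil => simp at hpt''
          | cons a t' => exact ⟨a, t', rfl⟩
        have hale : a ≤ p := by
          rcases List.mem_cons.mp hpt'' with h' | h'
          · omega
          · exact le_of_lt ((List.pairwise_cons.mp hpt).1 _ h')
        rw [(show 0 + 2 - 2 = 0 from rfl), (show 0 + 2 - 1 = 1 from rfl)]
        rw [List.getD_cons_zero, (show ((h :: a :: t' : List Int)).getD 1 0 = a from rfl)]
        rw [if_neg (by omega), List.getD_cons_zero]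
      | succ mm =>
        have hih := ih hpt hpt'' mm (by omega)
        rw [(show mm + 1 + 2 - 2 = mm + 1 from rfl), (show mm + 1 + 2 - 1 = mm + 2 from rfl)]
        rw [List.getD_cons_succ, List.getD_cons_succ, List.getD_cons_succ]
        rw [(show mm + 2 - 2 = mm from rfl), (show mm + 2 - 1 = mm + 1 from rfl)] at hih
        exact hih

-- ---------- structural facts ----------
theorem pv_len_order (A : List (Int × Int)) : (pvOrder A).length = A.length := by
  unfold pvOrder pvR
  rw [PySem.List.length_sorted, PySem.List.length_pyRange_one]
  simp
theorem pv_perm_order (A : List (Int × Int)) : (pvOrder A).Perm (pvR A) := by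
  exact PySem.List.sorted_perm _ _ _
theorem pv_L_eq (A : List (Int × Int)) : pvL A = (pvOrder A).map (pvF A) := by
  unfold pvL pvOrder
  rw [pv_sorted_map]
  rfl
theorem pv_len_L (A : List (Int × Int)) : (pvL A).length = A.length := by
  rw [pv_L_eq, List.length_map, pv_len_order]
theorem pv_bridge1 (A : List (Int × Int)) (p : Int) (h0 : 0 ≤ p) (h1 : p < (A.length : Int)) :
    (PySem.List.pyGetD (pvL A) p ((0, 0), 0)).1.1 = pvStf A p := by
  have hlen : p < ((pvOrder A).length : Int) := by rw [pv_len_order]; exact h1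
  rw [pv_L_eq, pv_getD_map _ _ _ _ 0 h0 hlen]
  unfold pvStf pvStartv
  rw [pv_getD_map _ _ _ _ 0 h0 hlen]
  rfl
theorem pv_bridge2 (A : List (Int × Int)) (p : Int) (h0 : 0 ≤ p) (h1 : p < (A.length : Int)) :
    (PySem.List.pyGetD (pvL A) p ((0, 0), 0)).1.2 = pvEnf A p := by
  have hlen : p < ((pvOrder A).length : Int) := by rw [pv_len_order]; exact h1
  rw [pv_L_eq, pv_getD_map _ _ _ _ 0 h0 hlen]
  unfold pvEnf pvEndv
  rw [pv_getD_map _ _ _ _ 0 h0 hlen]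
  rfl
theorem pv_bridge3 (A : List (Int × Int)) (p : Int) (h0 : 0 ≤ p) (h1 : p < (A.length : Int)) :
    (PySem.List.pyGetD (pvL A) p ((0, 0), 0)).2 = pvIdx A p := by
  have hlen : p < ((pvOrder A).length : Int) := by rw [pv_len_order]; exact h1
  rw [pv_L_eq, pv_getD_map _ _ _ _ 0 h0 hlen]
  unfold pvIdx
  rfl
theorem pv_mem_R (A : List (Int × Int)) (q : Int) : q ∈ pvR A ↔ 0 ≤ q ∧ q < (A.length : Int) := by
  unfold pvR
  rw [PySem.List.mem_pyRange_one]
  simp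
theorem pv_R_pairwise (A : List (Int × Int)) : (pvR A).Pairwise (· < ·) :=
  PySem.List.pairwise_lt_pyRange_one _ _
theorem pv_R_nodup (A : List (Int × Int)) : (pvR A).Nodup :=
  PySem.List.nodup_pyRange_one _ _
theorem pv_Q_pairwise (A : List (Int × Int)) (p : Int) : (pvQ A p).Pairwise (· < ·) :=
  (pv_R_pairwise A).filter _
theorem pv_mem_Q_self (A : List (Int × Int)) (p : Int) (h : p ∈ pvR A) : p ∈ pvQ A p := by
  unfold pvQ
  rw [List.mem_filter]
  exact ⟨h, by simp⟩
theorem pv_qual_eq (A : List (Int × Int)) (p : Int) :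
    pvQual A p = (pvQ A p).filter (fun q => decide (¬ p = q)) := by
  unfold pvQual pvQ
  rw [List.filter_filter]
  apply List.filter_congr
  intro q _
  by_cases h1 : p = q <;> by_cases h2 : pvStf A q ≤ pvStf A p <;>
    simp [h1, h2, not_or, not_lt, *]
theorem pv_len_Q_qual (A : List (Int × Int)) (p : Int) (h : p ∈ pvR A) :
    (pvQ A p).length = (pvQual A p).length + 1 := by
  have hnd : (pvQ A p).Nodup := (pv_R_nodup A).filter _
  have hmem : p ∈ pvQ A p := pv_mem_Q_self A p h
  have herase : (pvQ A p).filter (fun q => decide (¬ p = q)) = (pvQ A p).erase p := by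
    rw [List.Nodup.erase_eq_filter hnd]
    apply List.filter_congr
    intro q _
    by_cases hq : p = q
    · subst hq; simp
    · simp [hq, Ne.symm hq]
  rw [pv_qual_eq, herase, List.length_erase_of_mem hmem]
  have : 1 ≤ (pvQ A p).length := List.length_pos_of_mem hmem
  omega

-- ---------- A-side characterisation ----------
theorem pv_innerA_break (L : List ((Int × Int) × Int)) (i k : Int) :
    ∀ (js spans0 : List Int) (jl : Int) (m : Nat) (q : List Int),
      q = js.filter (fun j => decide (¬ (i = j ∨
          (PySem.List.pyGetD L j ((0, 0), 0)).1.1 > (PySem.List.pyGetD L i ((0, 0), 0)).1.1))) →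
      ((spans0.length : Int) + m = k) → 0 < m →
      kintersect2_innerA L i k spans0 jl js =
        (if m ≤ q.length then
           (spans0 ++ (q.take m).map (fun j => (PySem.List.pyGetD L j ((0, 0), 0)).2), q.getD (m - 1) 0)
         else (spans0 ++ q.map (fun j => (PySem.List.pyGetD L j ((0, 0), 0)).2), js.getLastD jl)) := by
  intro js
  induction js with
  | nil =>
    intro spans0 jl m q hq hm hm0
    subst hq
    simp [kintersect2_innerA, Nat.not_le.mpr hm0]
  | cons j js ih =>
    intro spans0 jl m q hq hm hm0
    simp only [kintersect2_innerA]
    by_cases hskip : i = j ∨ (PySem.List.pyGetD L j ((0, 0), 0)).1.1 > (PySem.List.pyGetD L i ((0, 0), 0)).1.1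
    · rw [if_pos hskip, ih spans0 j m q (by rw [hq, List.filter_cons]; simp [hskip]) hm hm0]
      rw [List.getLastD_cons]
    · rw [if_neg hskip]
      have hq' : q = j :: js.filter (fun j => decide (¬ (i = j ∨
          (PySem.List.pyGetD L j ((0, 0), 0)).1.1 > (PySem.List.pyGetD L i ((0, 0), 0)).1.1))) := by
        rw [hq, List.filter_cons]; simp [hskip]
      set q' := js.filter (fun j => decide (¬ (i = j ∨
          (PySem.List.pyGetD L j ((0, 0), 0)).1.1 > (PySem.List.pyGetD L i ((0, 0), 0)).1.1))) with hq'def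
      have hlen : PySem.List.len (spans0 ++ [(PySem.List.pyGetD L j ((0, 0), 0)).2])
          = (spans0.length : Int) + 1 := by
        simp [PySem.List.len]
      by_cases hm1 : m = 1
      · subst hm1
        rw [hq']
        simp only [hlen]
        rw [if_pos (by omega), if_pos (by rw [List.length_cons]; omega)]
        simp
      · simp only [hlen]
        rw [if_neg (by omega)]
        obtain ⟨mm, rfl⟩ : ∃ mm, m = mm + 1 := ⟨m - 1, by omega⟩
        obtain ⟨nn, rfl⟩ : ∃ nn, mm = nn + 1 := ⟨mm - 1, by omega⟩
        rw [ih _ j (nn + 1) q' rfl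
          (by simp only [List.length_append, List.length_cons, List.length_nil]; push_cast at hm ⊢; omega)
          (by omega)]
        rw [hq']
        by_cases hcase : nn + 1 ≤ q'.length
        · rw [if_pos hcase, if_pos (by rw [List.length_cons]; omega)]
          rw [List.take_succ_cons, List.map_cons,
            (show nn + 1 + 1 - 1 = nn + 1 from rfl), (show nn + 1 - 1 = nn from rfl),
            List.getD_cons_succ]
          simp [List.append_assoc]
        · rw [if_neg hcase, if_neg (by rw [List.length_cons]; omega)]
          rw [List.map_cons, List.getLastD_cons]
          simp [List.append_assoc]


theorem pv_innerA_nobreak (L : List ((Int × Int) × Int)) (i k : Int) (hk : k ≤ 0) :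
    ∀ (js spans0 : List Int) (jl : Int),
      kintersect2_innerA L i k spans0 jl js =
        (spans0 ++ (js.filter (fun j => decide (¬ (i = j ∨
            (PySem.List.pyGetD L j ((0, 0), 0)).1.1 > (PySem.List.pyGetD L i ((0, 0), 0)).1.1)))).map
            (fun j => (PySem.List.pyGetD L j ((0, 0), 0)).2),
         js.getLastD jl) := by
  intro js
  induction js with
  | nil => intro spans0 jl; simp [kintersect2_innerA]
  | cons j js ih =>
    intro spans0 jl
    simp only [kintersect2_innerA]
    by_cases hskip : i = j ∨ (PySem.List.pyGetD L j ((0, 0), 0)).1.1 > (PySem.List.pyGetD L i ((0, 0), 0)).1.1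
    · rw [if_pos hskip, ih spans0 j, List.filter_cons, List.getLastD_cons]
      simp [hskip]
    · rw [if_neg hskip]
      have hlen : PySem.List.len (spans0 ++ [(PySem.List.pyGetD L j ((0, 0), 0)).2])
          = (spans0.length : Int) + 1 := by
        simp [PySem.List.len]
      simp only [hlen]
      rw [if_neg (by omega), ih _ j, List.filter_cons, List.getLastD_cons]
      have : (decide (¬ (i = j ∨
          (PySem.List.pyGetD L j ((0, 0), 0)).1.1 > (PySem.List.pyGetD L i ((0, 0), 0)).1.1))) = true := by
        simp [hskip]
      rw [this]
      simp [List.append_assoc]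


theorem pv_pyGetD_nonneg (X : List Int) (j : Int) (hj : 0 ≤ j) :
    PySem.List.pyGetD X j 0 = X.getD j.toNat 0 := by
  unfold PySem.List.pyGetD
  rw [PySem.List.pyGet?_of_nonneg X hj, List.getD_eq_getElem?_getD]

theorem pv_portA_unfold (A : List (Int × Int)) (k : Int) (hk1 : ¬ k = 1) :
    kintersect2 A k =
      ((pvR A).foldl (fun (st : Int × List Int) i =>
        let r := kintersect2_innerA (pvL A) i k [(PySem.List.pyGetD (pvL A) i ((0, 0), 0)).2] 0 (pvR A)
        if PySem.List.len r.1 < k then st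
        else
          let length := min (PySem.List.pyGetD (pvL A) i ((0, 0), 0)).1.2
              (PySem.List.pyGetD (pvL A) r.2 ((0, 0), 0)).1.2
              - (PySem.List.pyGetD (pvL A) i ((0, 0), 0)).1.1
          if length > st.1 then (length, r.1) else st) (0, [])).2 := by
  unfold kintersect2 pvR pvL pvF
  rw [if_neg hk1]
  rfl

theorem pv_qual_filter_eq (A : List (Int × Int)) (i : Int) (h0 : 0 ≤ i) (h1 : i < (A.length : Int)) :
    (pvR A).filter (fun j => decide (¬ (i = j ∨
        (PySem.List.pyGetD (pvL A) j ((0, 0), 0)).1.1 > (PySem.List.pyGetD (pvL A) i ((0, 0), 0)).1.1)))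
      = pvQual A i := by
  unfold pvQual
  apply List.filter_congr
  intro j hj
  have hjb := (pv_mem_R A j).mp hj
  rw [pv_bridge1 A j hjb.1 hjb.2, pv_bridge1 A i h0 h1]

theorem pv_portA_fold (A : List (Int × Int)) (k : Int) (hk2 : 2 ≤ k) :
    kintersect2 A k = ((pvR A).foldl (pvGA A k) (0, ([] : List Int))).2 := by
  rw [pv_portA_unfold A k (by omega)]
  congr 1
  apply PySem.List.foldl_congr_mem
  intro st i hi
  have hib := (pv_mem_R A i).mp hi
  have hqual := pv_qual_filter_eq A i hib.1 hib.2
  have hQlen := pv_len_Q_qual A i hi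
  have hchar := pv_innerA_break (pvL A) i k (pvR A)
    [(PySem.List.pyGetD (pvL A) i ((0, 0), 0)).2] 0 (k - 1).toNat
    ((pvR A).filter (fun j => decide (¬ (i = j ∨
        (PySem.List.pyGetD (pvL A) j ((0, 0), 0)).1.1 > (PySem.List.pyGetD (pvL A) i ((0, 0), 0)).1.1))))
    rfl (by simp; omega) (by omega)
  rw [hqual] at hchar
  simp only []
  rw [hchar]
  by_cases hreach : pvReached A k i
  · have hm : (k - 1).toNat ≤ (pvQual A i).length := by
      have : k ≤ ((pvQ A i).length : Int) := hreach
      omega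
    rw [if_pos hm]
    -- spans
    have hspans : [(PySem.List.pyGetD (pvL A) i ((0, 0), 0)).2]
        ++ (((pvQual A i).take (k - 1).toNat).map (fun j => (PySem.List.pyGetD (pvL A) j ((0, 0), 0)).2))
        = pvSpans A k i := by
      unfold pvSpans
      rw [pv_bridge3 A i hib.1 hib.2]
      rw [List.map_congr_left (fun j hj => by
        have hjq : j ∈ pvQual A i := List.mem_of_mem_take hj
        have hjR : j ∈ pvR A := List.mem_of_mem_filter hjq
        have hjb := (pv_mem_R A j).mp hjR
        exact pv_bridge3 A j hjb.1 hjb.2)]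
      rfl
    -- the break index equals pvLast
    have hlast : (pvQual A i).getD ((k - 1).toNat - 1) 0 = pvLast A k i := by
      have hrank := pv_rank (pvQ A i) i k.toNat (pv_Q_pairwise A i) (pv_mem_Q_self A i hi)
        (by omega) (by have : k ≤ ((pvQ A i).length : Int) := hreach; omega)
      rw [pv_qual_eq A i]
      rw [(show (k - 1).toNat - 1 = k.toNat - 2 by omega)]
      rw [hrank]
      unfold pvLast
      rw [pv_pyGetD_nonneg _ _ (by omega : (0:Int) ≤ k - 1),
          pv_pyGetD_nonneg _ _ (by omega : (0:Int) ≤ k - 2),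
          (show (k - 1).toNat = k.toNat - 1 by omega),
          (show (k - 2).toNat = k.toNat - 2 by omega)]
    have hlastmem : pvLast A k i ∈ pvR A := by
      rw [← hlast]
      have hlt : (k - 1).toNat - 1 < (pvQual A i).length := by
        have : k ≤ ((pvQ A i).length : Int) := hreach
        omega
      have := List.getD_eq_getElem (pvQual A i) 0 hlt
      rw [this]
      exact List.mem_of_mem_filter (List.getElem_mem hlt)
    have hlastb := (pv_mem_R A (pvLast A k i)).mp hlastmem
    -- length of spans is exactly k, so the 'continue' guard is false
    have hlen1 : PySem.List.len ([(PySem.List.pyGetD (pvL A) i ((0, 0), 0)).2]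
        ++ (((pvQual A i).take (k - 1).toNat).map (fun j => (PySem.List.pyGetD (pvL A) j ((0, 0), 0)).2))) = k := by
      rw [PySem.List.len_eq]
      simp only [List.length_append, List.length_cons, List.length_nil, List.length_map,
        List.length_take]
      omega
    rw [hlen1]
    rw [if_neg (by omega)]
    unfold pvGA
    rw [if_pos hreach]
    unfold pvUpdA pvLen
    rw [hspans, hlast]
    rw [pv_bridge2 A i hib.1 hib.2, pv_bridge2 A (pvLast A k i) hlastb.1 hlastb.2,
        pv_bridge1 A i hib.1 hib.2]
  · have hm : ¬ (k - 1).toNat ≤ (pvQual A i).length := by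
      have : ¬ k ≤ ((pvQ A i).length : Int) := hreach
      omega
    rw [if_neg hm]
    have hlen2 : PySem.List.len ([(PySem.List.pyGetD (pvL A) i ((0, 0), 0)).2]
        ++ ((pvQual A i).map (fun j => (PySem.List.pyGetD (pvL A) j ((0, 0), 0)).2))) < k := by
      rw [PySem.List.len_eq]
      simp only [List.length_append, List.length_cons, List.length_nil, List.length_map]
      have : ¬ k ≤ ((pvQ A i).length : Int) := hreach
      omega
    rw [if_pos hlen2]
    unfold pvGA
    rw [if_neg hreach]

-- ---------- B-side characterisation ----------
theorem pv_ascL_sorted (A : List (Int × Int)) (P : List Int) : (pvAscL A P).Pairwise (· ≤ ·) := by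
  apply List.Pairwise.imp le_of_lt
  exact (pv_R_pairwise A).filter _

theorem pv_ascL_append (A : List (Int × Int)) (P : List Int) (p : Int)
    (hpR : p ∈ pvR A) (hp : p ∉ P) :
    pvAscL A (P ++ [p]) = List.orderedInsert (· ≤ ·) p (pvAscL A P) := by
  exact List.Perm.eq_of_pairwise (fun a b _ _ h1 h2 => le_antisymm h1 h2)
    (pv_ascL_sorted A (P ++ [p]))
    (List.Pairwise.orderedInsert p _ (pv_ascL_sorted A P))
    ((pv_filter_append_singleton_perm (pvR A) (pv_R_nodup A) P p hpR hp).trans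
      (List.perm_orderedInsert _ _ _).symm)


theorem pv_foldGB_skip (A : List (Int × Int)) (k : Int) :
    ∀ (l : List Int) (b : Int × Int), (∀ p ∈ l, ¬ pvReached A k p) → l.foldl (pvGB A k) b = b := by
  intro l
  induction l with
  | nil => intro b _; rfl
  | cons p t ih =>
    intro b h
    simp only [List.foldl_cons]
    rw [(show pvGB A k b p = b from by unfold pvGB; rw [if_neg (h p List.mem_cons_self)])]
    exact ih b (fun r hr => h r (List.mem_cons_of_mem _ hr))

theorem pv_foldGA_skip (A : List (Int × Int)) (k : Int) :
    ∀ (l : List Int) (st : Int × List Int), (∀ p ∈ l, ¬ pvReached A k p) → l.foldl (pvGA A k) st = st := by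
  intro l
  induction l with
  | nil => intro st _; rfl
  | cons p t ih =>
    intro st h
    simp only [List.foldl_cons]
    rw [(show pvGA A k st p = st from by unfold pvGA; rw [if_neg (h p List.mem_cons_self)])]
    exact ih st (fun r hr => h r (List.mem_cons_of_mem _ hr))

theorem pv_push_fold (A : List (Int × Int)) (k : Int) (hk2 : 2 ≤ k) :
    ∀ (g P : List Int), (P ++ g).Nodup → (∀ p ∈ g, p ∈ pvR A) →
      g.foldl (kintersect2_push k) ((pvAscL A P).take k.toNat)
        = (pvAscL A (P ++ g)).take k.toNat := by
  intro g
  induction g with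
  | nil => intro P _ _; simp
  | cons p t ih =>
    intro P hnd hsub
    have hpP : p ∉ P := by
      intro hcon
      have := List.disjoint_of_nodup_append hnd
      exact this hcon List.mem_cons_self
    have hstep : kintersect2_push k ((pvAscL A P).take k.toNat) p
        = (pvAscL A (P ++ [p])).take k.toNat := by
      unfold kintersect2_push
      have hbridge : (PySem.List.len (List.orderedInsert (· ≤ ·) p ((pvAscL A P).take k.toNat)) > k)
          ↔ k.toNat < (List.orderedInsert (· ≤ ·) p ((pvAscL A P).take k.toNat)).length := by
        rw [PySem.List.len_eq]
        omega
      rw [pv_ascL_append A P p (hsub p List.mem_cons_self) hpP]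
      rcases Classical.em (k.toNat < (List.orderedInsert (· ≤ ·) p ((pvAscL A P).take k.toNat)).length) with h | h
      · rw [if_pos (hbridge.mpr h), ← pv_push_take_nat, if_pos h]
      · rw [if_neg (fun hc => h (hbridge.mp hc)), ← pv_push_take_nat, if_neg h]
    simp only [List.foldl_cons]
    rw [hstep, ih (P ++ [p]) (by simpa using hnd) (fun r hr => hsub r (List.mem_cons_of_mem _ hr))]
    simp

theorem pv_bystart_perm (A : List (Int × Int)) : (pvBystart A).Perm (pvR A) :=
  PySem.List.sorted_perm _ _ _

theorem pv_bystart_nodup (A : List (Int × Int)) : (pvBystart A).Nodup :=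
  ((pv_bystart_perm A).nodup_iff).mpr (pv_R_nodup A)

theorem pv_bystart_pairwise (A : List (Int × Int)) :
    (pvBystart A).Pairwise (fun a b => pvStf A a ≤ pvStf A b) :=
  PySem.List.sorted_pairwise _ _

theorem pv_sweep_char (A : List (Int × Int)) (k : Int) (hk2 : 2 ≤ k) :
    ∀ (rest pre : List Int) (best : Int × Int),
      pvBystart A = pre ++ rest →
      (∀ q ∈ pre, ∀ r ∈ rest, pvStf A q < pvStf A r) →
      kintersect2_sweep (pvStartv A) (pvEndv A) k rest ((pvAscL A pre).take k.toNat) best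
        = rest.foldl (pvGB A k) best := by
  have main : ∀ (n : Nat) (rest pre : List Int) (best : Int × Int), rest.length ≤ n →
      pvBystart A = pre ++ rest →
      (∀ q ∈ pre, ∀ r ∈ rest, pvStf A q < pvStf A r) →
      kintersect2_sweep (pvStartv A) (pvEndv A) k rest ((pvAscL A pre).take k.toNat) best
        = rest.foldl (pvGB A k) best := by
    intro n
    induction n with
    | zero =>
      intro rest pre best hn hsplit hsep
      have h0 : rest = [] := List.length_eq_zero_iff.mp (by omega)
      subst h0
      rw [kintersect2_sweep]
      rfl
    | succ n ih =>
      intro rest pre best hn hsplit hsep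
      cases rest with
      | nil => rw [kintersect2_sweep]; rfl
      | cons p0 rest1 =>
        rw [kintersect2_sweep]
        -- abbreviations matching the unfolded body
        have hp0r : p0 ∈ (pre ++ p0 :: rest1) := by simp
        have hB := hsplit
        set pd := (fun p => decide (PySem.List.pyGetD (pvStartv A) p 0 = PySem.List.pyGetD (pvStartv A) p0 0)) with hpd
        set grp := p0 :: rest1.takeWhile pd with hgrp
        set rest' := rest1.dropWhile pd with hrest'
        have hdecomp : grp ++ rest' = p0 :: rest1 := by
          rw [hgrp, hrest']
          simp [List.takeWhile_append_dropWhile]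
        -- membership in B
        have hsubB : ∀ q ∈ pre ++ p0 :: rest1, q ∈ pvR A := by
          intro q hq
          exact (pv_bystart_perm A).mem_iff.mp (hsplit ▸ hq)
        have hndB : (pre ++ p0 :: rest1).Nodup := hsplit ▸ pv_bystart_nodup A
        have hpwB : (pre ++ p0 :: rest1).Pairwise (fun a b => pvStf A a ≤ pvStf A b) :=
          hsplit ▸ pv_bystart_pairwise A
        have hpw1 : (p0 :: rest1).Pairwise (fun a b => pvStf A a ≤ pvStf A b) :=
          (List.pairwise_append.mp hpwB).2.1
        -- every member of grp has start = start p0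
        have hgrp_eq : ∀ p ∈ grp, pvStf A p = pvStf A p0 := by
          intro p hp
          rcases List.mem_cons.mp (hgrp ▸ hp) with rfl | hp'
          · rfl
          · have := List.mem_takeWhile_imp hp'
            rw [hpd] at this
            simpa [pvStf] using of_decide_eq_true this
        -- members of rest' have start > start p0
        have hrest'_gt : ∀ r ∈ rest', pvStf A p0 < pvStf A r := by
          intro r hr
          have hrsub : rest' ⊆ rest1 := (List.dropWhile_sublist _).subset
          have hle : pvStf A p0 ≤ pvStf A r :=
            (List.pairwise_cons.mp hpw1).1 r (hrsub hr)
          rcases eq_or_lt_of_le hle with heq | hlt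
          · exfalso
            -- r is in dropWhile; the first element of dropWhile fails the predicate,
            -- and all of rest' have start ≥ the first element's start
            cases hre : rest' with
            | nil => rw [hre] at hr; simp at hr
            | cons r0 rs =>
              have hdw : rest1.dropWhile pd = r0 :: rs := by rw [← hrest']; exact hre
              have hne2 : rest1.dropWhile pd ≠ [] := by rw [hdw]; simp
              have hr0 : ¬ pd r0 = true := by
                have hhd := List.head_dropWhile_not pd hne2
                simp only [hdw, List.head_cons] at hhd
                simp [hhd]
              have hr0ne : pvStf A r0 ≠ pvStf A p0 := by
                intro hcon
                apply hr0
                rw [hpd]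
                simp only [decide_eq_true_eq]
                exact hcon
              have hr0le : pvStf A p0 ≤ pvStf A r0 :=
                (List.pairwise_cons.mp hpw1).1 r0 ((List.dropWhile_sublist _).subset (by rw [← hrest', hre]; simp))
              have hr0gt : pvStf A p0 < pvStf A r0 := lt_of_le_of_ne hr0le (Ne.symm hr0ne)
              -- pairwise inside rest' : r0 ≤ r
              have hpwrest' : (r0 :: rs).Pairwise (fun a b => pvStf A a ≤ pvStf A b) := by
                have : rest'.Pairwise (fun a b => pvStf A a ≤ pvStf A b) :=
                  List.Pairwise.sublist (hrest' ▸ List.dropWhile_sublist pd) ((List.pairwise_cons.mp hpw1).2)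
                rwa [hre] at this
              rcases List.mem_cons.mp (hre ▸ hr) with rfl | hrs
              · omega
              · have := (List.pairwise_cons.mp hpwrest').1 r hrs
                omega
          · exact hlt
        -- separation for the recursive call
        have hsep' : ∀ q ∈ pre ++ grp, ∀ r ∈ rest', pvStf A q < pvStf A r := by
          intro q hq r hr
          rcases List.mem_append.mp hq with hq | hq
          · apply hsep q hq
            have : r ∈ grp ++ rest' := List.mem_append.mpr (Or.inr hr)
            rw [hdecomp] at this
            exact this
          · have := hgrp_eq q hq
            have := hrest'_gt r hr
            omega
        -- Qk' = take K of ascending list of processed positions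
        have hgrpsub : ∀ p ∈ grp, p ∈ pvR A := by
          intro p hp
          apply hsubB
          have : p ∈ grp ++ rest' := List.mem_append.mpr (Or.inl hp)
          rw [hdecomp] at this
          simp [this]
        have hndpregrp : (pre ++ grp).Nodup := by
          have h1 : (pre ++ (grp ++ rest')).Nodup := by rw [hdecomp]; exact hndB
          rw [← List.append_assoc] at h1
          exact h1.of_append_left
        have hQk' : grp.foldl (kintersect2_push k) ((pvAscL A pre).take k.toNat)
            = (pvAscL A (pre ++ grp)).take k.toNat :=
          pv_push_fold A k hk2 grp pre hndpregrp hgrpsub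
        -- processed set = Q p for p in grp
        have hQp : ∀ p ∈ grp, pvAscL A (pre ++ grp) = pvQ A p := by
          intro p hp
          unfold pvAscL pvQ
          apply List.filter_congr
          intro q hqR
          have hqmem : q ∈ pre ++ (grp ++ rest') := by
            rw [hdecomp, ← hsplit]
            exact (pv_bystart_perm A).mem_iff.mpr hqR
          have hps : pvStf A p = pvStf A p0 := hgrp_eq p hp
          rcases List.mem_append.mp hqmem with hq | hq'
          · -- q ∈ pre : starts strictly below p0's
            have hlt : pvStf A q < pvStf A p0 := hsep q hq p0 List.mem_cons_self
            rw [List.contains_iff_mem.mpr (List.mem_append.mpr (Or.inl hq)),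
              decide_eq_true (by omega : pvStf A q ≤ pvStf A p)]
          · rcases List.mem_append.mp hq' with hq | hq
            · have heq : pvStf A q = pvStf A p0 := hgrp_eq q hq
              rw [List.contains_iff_mem.mpr (List.mem_append.mpr (Or.inr hq)),
                decide_eq_true (by omega : pvStf A q ≤ pvStf A p)]
            · have hgt : pvStf A p0 < pvStf A q := hrest'_gt q hq
              have hnotmem : q ∉ pre ++ grp := by
                intro hc
                rcases List.mem_append.mp hc with hc | hc
                · have := hsep q hc p0 List.mem_cons_self
                  omega
                · have := hgrp_eq q hc
                  omega
              have h1 : (pre ++ grp).contains q = false := by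
                rw [← Bool.not_eq_true]
                intro hc
                exact hnotmem (List.contains_iff_mem.mp hc)
              rw [h1, decide_eq_false (by omega : ¬ pvStf A q ≤ pvStf A p)]
        -- the group guard matches pvReached
        have hlenQk : ∀ p ∈ grp, (PySem.List.len (grp.foldl (kintersect2_push k) ((pvAscL A pre).take k.toNat)) = k
            ↔ pvReached A k p) := by
          intro p hp
          rw [hQk', hQp p hp, PySem.List.len_eq, List.length_take]
          unfold pvReached
          omega
        -- candidate step equals pvGB on the group when the guard holds
        have hcand : ∀ p ∈ grp, pvReached A k p →
            ∀ b, kintersect2_cand (pvEndv A) k (PySem.List.pyGetD (pvStartv A) p0 0)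
                (grp.foldl (kintersect2_push k) ((pvAscL A pre).take k.toNat)) b p = pvGB A k b p := by
          intro p hp hreach b
          have hQeq : grp.foldl (kintersect2_push k) ((pvAscL A pre).take k.toNat) = (pvQ A p).take k.toNat := by
            rw [hQk', hQp p hp]
          have hlenQ : k ≤ ((pvQ A p).length : Int) := hreach
          have hgetd : ∀ (j : Int), 0 ≤ j → j < k →
              PySem.List.pyGetD ((pvQ A p).take k.toNat) j 0 = PySem.List.pyGetD (pvQ A p) j 0 := by
            intro j hj0 hjk
            rw [PySem.List.pyGetD_eq_getElem _ _ hj0 (by rw [List.length_take]; push_cast; omega),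
                PySem.List.pyGetD_eq_getElem _ _ hj0 (by push_cast; omega)]
            rw [List.getElem_take]
          unfold kintersect2_cand pvGB pvUpdB pvLen pvLast
          rw [if_pos hreach, hQeq]
          rw [hgetd (k-1) (by omega) (by omega), hgetd (k-2) (by omega) (by omega)]
          have hsp : PySem.List.pyGetD (pvStartv A) p0 0 = pvStf A p := (hgrp_eq p hp).symm
          rw [hsp]
          rfl
        -- put the pieces together
        rw [hQk']
        by_cases hguard : PySem.List.len ((pvAscL A (pre ++ grp)).take k.toNat) = k
        · rw [if_pos hguard]
          have hreachgrp : ∀ p ∈ grp, pvReached A k p := by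
            intro p hp
            exact ((hlenQk p hp).mp (by rw [hQk']; exact hguard))
          have hfold : grp.foldl (kintersect2_cand (pvEndv A) k (PySem.List.pyGetD (pvStartv A) p0 0)
              ((pvAscL A (pre ++ grp)).take k.toNat)) best = grp.foldl (pvGB A k) best := by
            apply PySem.List.foldl_congr_mem
            intro b p hp
            rw [← hQk']
            exact hcand p hp (hreachgrp p hp) b
          rw [hfold]
          have := ih rest' (pre ++ grp) (grp.foldl (pvGB A k) best)
            (by
              have h1 : rest'.length ≤ rest1.length := List.length_dropWhile_le _ _
              simp only [List.length_cons] at hn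
              omega)
            (by rw [hsplit, List.append_assoc]; congr 1; exact hdecomp.symm)
            hsep'
          rw [this]
          conv_rhs => rw [← hdecomp, List.foldl_append]
        · rw [if_neg hguard]
          have hnreachgrp : ∀ p ∈ grp, ¬ pvReached A k p := by
            intro p hp hreach
            exact hguard (by rw [← hQk']; exact (hlenQk p hp).mpr hreach)
          have := ih rest' (pre ++ grp) best
            (by
              have h1 : rest'.length ≤ rest1.length := List.length_dropWhile_le _ _
              simp only [List.length_cons] at hn
              omega)
            (by rw [hsplit, List.append_assoc]; congr 1; exact hdecomp.symm)
            hsep'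
          rw [this]
          conv_rhs => rw [← hdecomp, List.foldl_append]
          rw [pv_foldGB_skip A k grp best hnreachgrp]
  intro rest pre best hsplit hsep
  exact main rest.length rest pre best (le_refl _) hsplit hsep

set_option maxHeartbeats 1000000 in
theorem pv_updB_comm (A : List (Int × Int)) (k : Int) (z : Int × Int) (p q : Int)
    (hp : 0 ≤ p) (hq : 0 ≤ q) :
    pvGB A k (pvGB A k z p) q = pvGB A k (pvGB A k z q) p := by
  unfold pvGB pvUpdB pvReached
  rcases z with ⟨z1, z2⟩
  split_ifs <;> simp_all [Prod.ext_iff] <;> omega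

theorem pv_sweep_eq_foldR (A : List (Int × Int)) (k : Int) (hk2 : 2 ≤ k) :
    kintersect2_sweep (pvStartv A) (pvEndv A) k (pvBystart A) [] (0, -1)
      = (pvR A).foldl (pvGB A k) (0, -1) := by
  have hascnil : (pvAscL A ([] : List Int)).take k.toNat = [] := by
    unfold pvAscL
    simp
  have h1 := pv_sweep_char A k hk2 (pvBystart A) [] (0, -1) (by simp) (by simp)
  rw [hascnil] at h1
  rw [h1]
  exact List.Perm.foldl_eq' (pv_bystart_perm A)
    (fun x hx y hy z => pv_updB_comm A k z x y
      ((pv_mem_R A x).mp ((pv_bystart_perm A).mem_iff.mp hx)).1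
      ((pv_mem_R A y).mp ((pv_bystart_perm A).mem_iff.mp hy)).1)
    (0, -1)

theorem pv_recon_char (startv order : List Int) (k s bp : Int) :
    ∀ (js spans0 : List Int) (m : Nat) (qf : List Int),
      qf = js.filter (fun j => decide (j ≠ bp ∧ PySem.List.pyGetD startv j 0 ≤ s)) →
      ((spans0.length : Int) + m = k) → 0 < m →
      kintersect2_recon startv order k s bp spans0 js =
        (if m ≤ qf.length then spans0 ++ (qf.take m).map (fun j => PySem.List.pyGetD order j 0)
         else spans0 ++ qf.map (fun j => PySem.List.pyGetD order j 0)) := by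
  intro js
  induction js with
  | nil =>
    intro spans0 m qf hq hm hm0
    subst hq
    simp [kintersect2_recon, Nat.not_le.mpr hm0]
  | cons j js ih =>
    intro spans0 m qf hq hm hm0
    simp only [kintersect2_recon]
    by_cases hc : j ≠ bp ∧ PySem.List.pyGetD startv j 0 ≤ s
    · rw [if_pos hc]
      have hq' : qf = j :: js.filter (fun j => decide (j ≠ bp ∧ PySem.List.pyGetD startv j 0 ≤ s)) := by
        rw [hq, List.filter_cons]; simp [hc]
      set q' := js.filter (fun j => decide (j ≠ bp ∧ PySem.List.pyGetD startv j 0 ≤ s)) with hq'def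
      have hlen : PySem.List.len (spans0 ++ [PySem.List.pyGetD order j 0])
          = (spans0.length : Int) + 1 := by simp [PySem.List.len]
      by_cases hm1 : m = 1
      · subst hm1
        rw [hq']
        simp only [hlen]
        rw [if_pos (by omega), if_pos (by rw [List.length_cons]; omega)]
        simp
      · simp only [hlen]
        rw [if_neg (by omega)]
        obtain ⟨mm, rfl⟩ : ∃ mm, m = mm + 1 := ⟨m - 1, by omega⟩
        have hmm : 0 < mm := by omega
        rw [ih _ mm q' rfl
          (by simp only [List.length_append, List.length_cons, List.length_nil]; push_cast at hm ⊢; omega)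
          hmm]
        rw [hq']
        by_cases hcase : mm ≤ q'.length
        · rw [if_pos hcase, if_pos (by rw [List.length_cons]; omega)]
          rw [List.take_succ_cons, List.map_cons]
          simp [List.append_assoc]
        · rw [if_neg hcase, if_neg (by rw [List.length_cons]; omega)]
          rw [List.map_cons]
          simp [List.append_assoc]
    · rw [if_neg hc, ih spans0 m qf (by rw [hq, List.filter_cons]; simp [hc]) hm hm0]


-- ---------- the two folds agree ----------
theorem pv_foldAB (A : List (Int × Int)) (k : Int) :
    ∀ (l : List Int), l.Pairwise (· < ·) → (∀ p ∈ l, p ∈ pvR A) →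
      ∀ (a : Int × List Int) (b : Int × Int),
        a.1 = b.1 → (b.2 < 0 → a.2 = []) →
        (0 ≤ b.2 → a.2 = pvSpans A k b.2 ∧ pvReached A k b.2 ∧ b.2 ∈ pvR A) →
        (∀ p ∈ l, b.2 < p) →
        (l.foldl (pvGA A k) a).1 = (l.foldl (pvGB A k) b).1 ∧
        ((l.foldl (pvGB A k) b).2 < 0 → (l.foldl (pvGA A k) a).2 = []) ∧
        (0 ≤ (l.foldl (pvGB A k) b).2 →
          (l.foldl (pvGA A k) a).2 = pvSpans A k (l.foldl (pvGB A k) b).2 ∧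
          pvReached A k (l.foldl (pvGB A k) b).2 ∧ (l.foldl (pvGB A k) b).2 ∈ pvR A) := by
  intro l
  induction l with
  | nil => intro _ _ a b h1 h2 h3 _; exact ⟨h1, h2, h3⟩
  | cons p t ih =>
    intro hpw hsub a b h1 h2 h3 hfut
    rcases List.pairwise_cons.mp hpw with ⟨hpt, hpw'⟩
    have hbp : b.2 < p := hfut p List.mem_cons_self
    have hp0 : 0 ≤ p := ((pv_mem_R A p).mp (hsub p List.mem_cons_self)).1
    simp only [List.foldl_cons]
    by_cases hr : pvReached A k p
    · by_cases hup : pvLen A k p > b.1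
      · have eB : pvGB A k b p = (pvLen A k p, p) := by
          unfold pvGB pvUpdB
          rw [if_pos hr, if_pos (Or.inl hup)]
        have eA : pvGA A k a p = (pvLen A k p, pvSpans A k p) := by
          unfold pvGA pvUpdA
          rw [if_pos hr, if_pos (h1 ▸ hup)]
        rw [eA, eB]
        refine ih hpw' (fun r hrr => hsub r (List.mem_cons_of_mem _ hrr)) _ _ rfl ?_ ?_ ?_
        · intro hcon; omega
        · intro _; exact ⟨rfl, hr, hsub p List.mem_cons_self⟩
        · intro r hrr; exact hpt r hrr
      · have eB : pvGB A k b p = b := by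
          unfold pvGB pvUpdB
          rw [if_pos hr, if_neg (by rintro (h | ⟨h1', h2', h3'⟩) <;> omega)]
        have eA : pvGA A k a p = a := by
          unfold pvGA pvUpdA
          rw [if_pos hr, if_neg (h1 ▸ hup)]
        rw [eA, eB]
        refine ih hpw' (fun r hrr => hsub r (List.mem_cons_of_mem _ hrr)) _ _ h1 h2 h3 ?_
        intro r hrr; exact lt_trans hbp (hpt r hrr)
    · have eB : pvGB A k b p = b := by unfold pvGB; rw [if_neg hr]
      have eA : pvGA A k a p = a := by unfold pvGA; rw [if_neg hr]
      rw [eA, eB]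
      refine ih hpw' (fun r hrr => hsub r (List.mem_cons_of_mem _ hrr)) _ _ h1 h2 h3 ?_
      intro r hrr; exact lt_trans hbp (hpt r hrr)

-- ---------- case lemmas ----------
theorem pv_max_fold_bridge (f : Int → Int) :
    ∀ (l : List Int),
      (l.foldl (fun (st : Int × List Int) i => if f i > st.1 then (f i, [i]) else st) (0, [])).2
        = (match PySem.List.max? l f with
           | none => []
           | some b => if f b > 0 then [b] else []) := by
  have gen : ∀ (l : List Int) (st : Int × List Int) (acc : Option Int),
      ((acc = none ∧ st = (0, [])) ∨
       (∃ m, acc = some m ∧ ((f m ≤ 0 ∧ st = (0, [])) ∨ (0 < f m ∧ st = (f m, [m]))))) →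
      (l.foldl (fun (st : Int × List Int) i => if f i > st.1 then (f i, [i]) else st) st).2
        = (match l.foldl (fun acc x =>
              match acc with
              | none => some x
              | some m => if f m < f x then some x else some m) acc with
           | none => []
           | some b => if f b > 0 then [b] else []) := by
    intro l
    induction l with
    | nil =>
      intro st acc h
      rcases h with ⟨rfl, rfl⟩ | ⟨m, rfl, h⟩
      · simp
      · rcases h with ⟨hle, rfl⟩ | ⟨hgt, rfl⟩
        · show ([] : List Int) = if f m > 0 then [m] else []
          rw [if_neg (by omega)]
        · show [m] = if f m > 0 then [m] else []
          rw [if_pos hgt]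
    | cons x t ih =>
      intro st acc h
      simp only [List.foldl_cons]
      rcases h with ⟨rfl, rfl⟩ | ⟨m, rfl, hm⟩
      · apply ih
        by_cases hx : 0 < f x
        · right
          refine ⟨x, rfl, Or.inr ⟨hx, ?_⟩⟩
          show (if f x > (0 : Int) then (f x, [x]) else ((0 : Int), ([] : List Int))) = (f x, [x])
          rw [if_pos hx]
        · right
          refine ⟨x, rfl, Or.inl ⟨by omega, ?_⟩⟩
          show (if f x > (0 : Int) then (f x, [x]) else ((0 : Int), ([] : List Int))) = (0, [])
          rw [if_neg (by omega)]
      · rcases hm with ⟨hle, rfl⟩ | ⟨hgt, rfl⟩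
        · apply ih
          by_cases hlt : f m < f x
          · by_cases hx : 0 < f x
            · right
              refine ⟨x, ?_, Or.inr ⟨hx, ?_⟩⟩
              · show (if f m < f x then some x else some m) = some x
                rw [if_pos hlt]
              · show (if f x > (0 : Int) then (f x, [x]) else ((0 : Int), ([] : List Int))) = (f x, [x])
                rw [if_pos hx]
            · right
              refine ⟨x, ?_, Or.inl ⟨by omega, ?_⟩⟩
              · show (if f m < f x then some x else some m) = some x
                rw [if_pos hlt]
              · show (if f x > (0 : Int) then (f x, [x]) else ((0 : Int), ([] : List Int))) = (0, [])
                rw [if_neg (by omega)]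
          · right
            refine ⟨m, ?_, Or.inl ⟨hle, ?_⟩⟩
            · show (if f m < f x then some x else some m) = some m
              rw [if_neg hlt]
            · show (if f x > (0 : Int) then (f x, [x]) else ((0 : Int), ([] : List Int))) = (0, [])
              rw [if_neg (by omega)]
        · apply ih
          by_cases hlt : f m < f x
          · right
            refine ⟨x, ?_, Or.inr ⟨by omega, ?_⟩⟩
            · show (if f m < f x then some x else some m) = some x
              rw [if_pos hlt]
            · show (if f x > (f m, [m]).1 then (f x, [x]) else (f m, [m])) = (f x, [x])
              rw [if_pos (by show f x > f m; omega)]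
          · right
            refine ⟨m, ?_, Or.inr ⟨hgt, ?_⟩⟩
            · show (if f m < f x then some x else some m) = some m
              rw [if_neg hlt]
            · show (if f x > (f m, [m]).1 then (f x, [x]) else (f m, [m])) = (f m, [m])
              rw [if_neg (by show ¬ f x > f m; omega)]
  intro l
  have hmax : PySem.List.max? l f = l.foldl (fun acc x =>
      match acc with
      | none => some x
      | some m => if f m < f x then some x else some m) none := by
    unfold PySem.List.max?
    congr 1
    funext acc x
    cases acc <;> rfl
  rw [gen l (0, []) none (Or.inl ⟨rfl, rfl⟩), hmax]

theorem pv_case_one (A : List (Int × Int)) : kintersect2 A 1 = kintersect2_alt A 1 := by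
  unfold kintersect2 kintersect2_alt
  rw [if_pos rfl, if_pos rfl]
  by_cases hn : PySem.List.len A = 0
  · rw [if_pos hn]
    have hr : PySem.List.pyRange 0 (PySem.List.len A) 1 = [] :=
      PySem.List.pyRange_one_eq_nil (by omega)
    rw [hr]
    rfl
  · rw [if_neg hn]
    exact pv_max_fold_bridge _ _

theorem pv_foldl_fix {α β : Type} (l : List α) (g : β → α → β) (st : β)
    (h : ∀ x ∈ l, g st x = st) : l.foldl g st = st := by
  induction l with
  | nil => rfl
  | cons x t ih =>
    simp only [List.foldl_cons]
    rw [h x List.mem_cons_self]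
    exact ih (fun y hy => h y (List.mem_cons_of_mem _ hy))

theorem pv_R_getLastD (A : List (Int × Int)) (hne : A ≠ []) :
    (pvR A).getLastD 0 = (A.length : Int) - 1 := by
  unfold pvR
  rw [(show PySem.List.len A = ((A.length : Int) - 1) + 1 from by
    rw [PySem.List.len_eq]
    have : A.length ≠ 0 := fun h => hne (List.length_eq_zero_iff.mp h)
    omega)]
  rw [PySem.List.pyRange_one_succ_right (by
    have : A.length ≠ 0 := fun h => hne (List.length_eq_zero_iff.mp h)
    omega)]
  rw [List.getLastD_concat]

theorem pv_pair_mem (A : List (Int × Int)) (p : Int) (hp : p ∈ pvR A) :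
    (pvStf A p, pvEnf A p) ∈ A := by
  have hpb := (pv_mem_R A p).mp hp
  have hlenord : p < ((pvOrder A).length : Int) := by rw [pv_len_order]; exact hpb.2
  have hidxmem : pvIdx A p ∈ pvOrder A := by
    unfold pvIdx
    rw [PySem.List.pyGetD_eq_getElem _ _ hpb.1 hlenord]
    exact List.getElem_mem _
  have hidxR : pvIdx A p ∈ pvR A := (pv_perm_order A).mem_iff.mp hidxmem
  have hidxb := (pv_mem_R A (pvIdx A p)).mp hidxR
  have hstf : pvStf A p = (PySem.List.pyGetD A (pvIdx A p) (0, 0)).1 := by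
    unfold pvStf pvStartv pvIdx
    rw [pv_getD_map _ _ _ _ 0 hpb.1 hlenord]
  have henf : pvEnf A p = (PySem.List.pyGetD A (pvIdx A p) (0, 0)).2 := by
    unfold pvEnf pvEndv pvIdx
    rw [pv_getD_map _ _ _ _ 0 hpb.1 hlenord]
  rw [hstf, henf]
  rw [PySem.List.pyGetD_eq_getElem A _ hidxb.1 hidxb.2]
  exact List.getElem_mem _

theorem pv_pair_surj (A : List (Int × Int)) (q : Int × Int) (hq : q ∈ A) :
    ∃ p, p ∈ pvR A ∧ pvStf A p = q.1 ∧ pvEnf A p = q.2 := by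
  obtain ⟨t, ht, hAt⟩ := List.mem_iff_getElem.mp hq
  have htR : (t : Int) ∈ pvR A := (pv_mem_R A t).mpr (by constructor <;> [positivity; exact_mod_cast ht])
  have hx : pvF A (t : Int) ∈ (pvR A).map (pvF A) := List.mem_map_of_mem htR
  have hxL : pvF A (t : Int) ∈ pvL A := by
    unfold pvL
    rw [PySem.List.mem_sorted]
    exact hx
  obtain ⟨j, hj, hLj⟩ := List.mem_iff_getElem.mp hxL
  have hjlen : (j : Int) < (A.length : Int) := by
    have := pv_len_L A
    omega
  refine ⟨(j : Int), (pv_mem_R A j).mpr ⟨by positivity, hjlen⟩, ?_, ?_⟩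
  · rw [← pv_bridge1 A (j : Int) (by positivity) hjlen]
    rw [PySem.List.pyGetD_eq_getElem _ _ (by positivity) (by rw [pv_len_L]; exact hjlen)]
    simp only [Int.toNat_natCast]
    rw [hLj]
    show (PySem.List.pyGetD A (t : Int) (0, 0)).1 = q.1
    rw [PySem.List.pyGetD_eq_getElem A _ (by positivity) (by exact_mod_cast ht)]
    simp only [Int.toNat_natCast]
    rw [hAt]
  · rw [← pv_bridge2 A (j : Int) (by positivity) hjlen]
    rw [PySem.List.pyGetD_eq_getElem _ _ (by positivity) (by rw [pv_len_L]; exact hjlen)]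
    simp only [Int.toNat_natCast]
    rw [hLj]
    show (PySem.List.pyGetD A (t : Int) (0, 0)).2 = q.2
    rw [PySem.List.pyGetD_eq_getElem A _ (by positivity) (by exact_mod_cast ht)]
    simp only [Int.toNat_natCast]
    rw [hAt]

theorem pv_enf_antitone (A : List (Int × Int)) (p : Int) (hp : p ∈ pvR A) :
    pvEnf A ((A.length : Int) - 1) ≤ pvEnf A p := by
  have hpb := (pv_mem_R A p).mp hp
  have hA0 : A.length ≠ 0 := by
    intro h
    omega
  have hb1 : (0 : Int) ≤ (A.length : Int) - 1 := by omega
  have hb2 : (A.length : Int) - 1 < (A.length : Int) := by omega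
  rw [← pv_bridge2 A p hpb.1 hpb.2, ← pv_bridge2 A _ hb1 hb2]
  have hLlen := pv_len_L A
  rw [PySem.List.pyGetD_eq_getElem _ _ hpb.1 (by omega), PySem.List.pyGetD_eq_getElem _ _ hb1 (by omega)]
  have hpw : (pvL A).Pairwise (fun a b => b.1.2 ≤ a.1.2) := PySem.List.sorted_pairwise_rev _ _
  rcases eq_or_lt_of_le (show p.toNat ≤ ((A.length : Int) - 1).toNat by omega) with heq | hlt
  · simp only [show ((A.length : Int) - 1).toNat = p.toNat from by omega]
    exact le_refl _
  · have := List.pairwise_iff_getElem.mp hpw p.toNat (((A.length : Int) - 1).toNat)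
      (by omega) (by omega) hlt
    exact this

theorem pv_ends_ge_last (A : List (Int × Int)) (q : Int × Int) (hq : q ∈ A) :
    pvEnf A ((A.length : Int) - 1) ≤ q.2 := by
  obtain ⟨p, hpR, _, henf⟩ := pv_pair_surj A q hq
  rw [← henf]
  exact pv_enf_antitone A p hpR

theorem pv_case_nonpos (A : List (Int × Int)) (k : Int) (hk : k ≤ 0) (hnd : ¬ D_kintersect2 A k) :
    kintersect2 A k = kintersect2_alt A k := by
  have hB : kintersect2_alt A k = [] := by
    unfold kintersect2_alt
    rw [if_neg (by omega), if_pos (Or.inl (by omega))]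
  rw [hB, pv_portA_unfold A k (by omega)]
  rcases eq_or_ne A [] with rfl | hne
  · have h0 : pvR ([] : List (Int × Int)) = [] := by
      unfold pvR
      exact PySem.List.pyRange_one_eq_nil (by rw [PySem.List.len_eq]; simp)
    rw [h0]
    rfl
  · have hno : ∀ p ∈ A, ∃ q ∈ A, q.2 ≤ p.1 := by
      unfold D_kintersect2 at hnd
      push_neg at hnd
      intro p hp
      obtain ⟨q, hqA, hq2⟩ := hnd hk hne p hp
      exact ⟨q, hqA, hq2⟩
    rw [pv_foldl_fix]
    intro i hi
    have hib := (pv_mem_R A i).mp hi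
    have hchar := pv_innerA_nobreak (pvL A) i k hk (pvR A)
      [(PySem.List.pyGetD (pvL A) i ((0, 0), 0)).2] 0
    simp only []
    rw [hchar]
    rw [if_neg (by
      rw [PySem.List.len_eq]
      simp only [List.length_append, List.length_cons, List.length_nil]
      omega)]
    rw [pv_R_getLastD A hne]
    have hb1 : (0 : Int) ≤ (A.length : Int) - 1 := by
      have : A.length ≠ 0 := fun h => hne (List.length_eq_zero_iff.mp h)
      omega
    have hb2 : (A.length : Int) - 1 < (A.length : Int) := by omega
    rw [pv_bridge1 A i hib.1 hib.2, pv_bridge2 A i hib.1 hib.2, pv_bridge2 A _ hb1 hb2]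
    have hpm := pv_pair_mem A i hi
    obtain ⟨q, hqA, hq2⟩ := hno _ hpm
    have hlast := pv_ends_ge_last A q hqA
    rw [if_neg (by
      show ¬ (min (pvEnf A i) (pvEnf A ((A.length : Int) - 1)) - pvStf A i > (0 : Int))
      simp only [not_lt]
      have h1 : min (pvEnf A i) (pvEnf A ((A.length : Int) - 1)) ≤ pvEnf A ((A.length : Int) - 1) :=
        min_le_right _ _
      omega)]

theorem pv_case_big (A : List (Int × Int)) (k : Int) (hk2 : 2 ≤ k) (hkn : (A.length : Int) < k) :
    kintersect2 A k = kintersect2_alt A k := by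
  rw [pv_portA_fold A k hk2]
  have hnone : ∀ p ∈ pvR A, ¬ pvReached A k p := by
    intro p _ hr
    have h1 : (pvQ A p).length ≤ (pvR A).length := List.length_filter_le _ _
    have h2 : (pvR A).length = A.length := by
      unfold pvR
      rw [PySem.List.length_pyRange_one]
      simp
    unfold pvReached at hr
    omega
  rw [pv_foldGA_skip A k _ _ hnone]
  unfold kintersect2_alt
  rw [if_neg (by omega), if_pos (Or.inr (by rw [PySem.List.len_eq]; omega))]

theorem pv_portB_unfold (A : List (Int × Int)) (k : Int) (hk1 : ¬ k = 1)
    (hg : ¬ (k < 1 ∨ PySem.List.len A < k)) :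
    kintersect2_alt A k =
      (if (kintersect2_sweep (pvStartv A) (pvEndv A) k (pvBystart A) [] (0, -1)).2 < 0 then []
       else kintersect2_recon (pvStartv A) (pvOrder A) k
         (PySem.List.pyGetD (pvStartv A) (kintersect2_sweep (pvStartv A) (pvEndv A) k (pvBystart A) [] (0, -1)).2 0)
         (kintersect2_sweep (pvStartv A) (pvEndv A) k (pvBystart A) [] (0, -1)).2
         [PySem.List.pyGetD (pvOrder A) (kintersect2_sweep (pvStartv A) (pvEndv A) k (pvBystart A) [] (0, -1)).2 0]
         (pvR A)) := by
  unfold kintersect2_alt pvR pvOrder pvStartv pvEndv pvBystart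
  rw [if_neg hk1, if_neg hg]
  rfl

theorem pv_case_main (A : List (Int × Int)) (k : Int) (hk2 : 2 ≤ k) (hkn : k ≤ (A.length : Int)) :
    kintersect2 A k = kintersect2_alt A k := by
  rw [pv_portA_fold A k hk2, pv_portB_unfold A k (by omega) (by rw [PySem.List.len_eq]; omega)]
  rw [pv_sweep_eq_foldR A k hk2]
  obtain ⟨h1, h2, h3⟩ := pv_foldAB A k (pvR A) (pv_R_pairwise A) (fun p hp => hp)
    (0, []) (0, -1) rfl (fun _ => rfl) (fun hcon => absurd hcon (by omega))
    (fun p hp => by have := (pv_mem_R A p).mp hp; omega)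
  by_cases hb : ((pvR A).foldl (pvGB A k) (0, -1)).2 < 0
  · rw [if_pos hb]
    exact h2 hb
  · rw [if_neg hb]
    obtain ⟨hspans, hreach, hmem⟩ := h3 (by omega)
    set bp := ((pvR A).foldl (pvGB A k) (0, -1)).2 with hbp
    have hbpb := (pv_mem_R A bp).mp hmem
    rw [hspans]
    have hqual : (pvR A).filter (fun j => decide (j ≠ bp ∧
        PySem.List.pyGetD (pvStartv A) j 0 ≤ PySem.List.pyGetD (pvStartv A) bp 0)) = pvQual A bp := by
      unfold pvQual
      apply List.filter_congr
      intro j _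
      apply decide_eq_decide.mpr
      unfold pvStf
      constructor
      · rintro ⟨hne, hle⟩ (hor | hor)
        · exact hne hor.symm
        · omega
      · intro h
        rw [not_or] at h
        exact ⟨fun hc => h.1 hc.symm, by omega⟩
    have hchar := pv_recon_char (pvStartv A) (pvOrder A) k
      (PySem.List.pyGetD (pvStartv A) bp 0) bp (pvR A)
      [PySem.List.pyGetD (pvOrder A) bp 0] (k - 1).toNat
      ((pvR A).filter (fun j => decide (j ≠ bp ∧
        PySem.List.pyGetD (pvStartv A) j 0 ≤ PySem.List.pyGetD (pvStartv A) bp 0)))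
      rfl (by simp only [List.length_cons, List.length_nil]; push_cast; omega) (by omega)
    rw [hqual] at hchar
    rw [hchar]
    have hm : (k - 1).toNat ≤ (pvQual A bp).length := by
      have hQlen := pv_len_Q_qual A bp hmem
      have : k ≤ ((pvQ A bp).length : Int) := hreach
      omega
    rw [if_pos hm]
    unfold pvSpans
    rw [List.singleton_append]
    congr 1

-- ---------- tight claim helpers ----------
def pvLenT (A : List (Int × Int)) (i : Int) : Int :=
  min (pvEnf A i) (pvEnf A ((A.length : Int) - 1)) - pvStf A i
def pvSpansT (A : List (Int × Int)) (i : Int) : List Int :=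
  [(PySem.List.pyGetD (pvL A) i ((0, 0), 0)).2]
    ++ (pvQual A i).map (fun j => (PySem.List.pyGetD (pvL A) j ((0, 0), 0)).2)
def pvBodyT (A : List (Int × Int)) (st : Int × List Int) (i : Int) : Int × List Int :=
  if pvLenT A i > st.1 then (pvLenT A i, pvSpansT A i) else st

theorem pv_portA_nonpos_fold (A : List (Int × Int)) (k : Int) (hk : k ≤ 0) (hne : A ≠ []) :
    kintersect2 A k = ((pvR A).foldl (pvBodyT A) (0, [])).2 := by
  rw [pv_portA_unfold A k (by omega)]
  congr 1
  apply PySem.List.foldl_congr_mem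
  intro st i hi
  have hib := (pv_mem_R A i).mp hi
  have hchar := pv_innerA_nobreak (pvL A) i k hk (pvR A)
    [(PySem.List.pyGetD (pvL A) i ((0, 0), 0)).2] 0
  simp only []
  rw [hchar]
  rw [if_neg (by
    rw [PySem.List.len_eq]
    simp only [List.length_append, List.length_cons, List.length_nil]
    omega)]
  rw [pv_R_getLastD A hne]
  have hb1 : (0 : Int) ≤ (A.length : Int) - 1 := by
    have : A.length ≠ 0 := fun h => hne (List.length_eq_zero_iff.mp h)
    omega
  have hb2 : (A.length : Int) - 1 < (A.length : Int) := by omega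
  rw [pv_qual_filter_eq A i hib.1 hib.2]
  rw [pv_bridge1 A i hib.1 hib.2, pv_bridge2 A i hib.1 hib.2, pv_bridge2 A _ hb1 hb2]
  rfl

theorem pv_bodyT_fst_mono (A : List (Int × Int)) :
    ∀ (l : List Int) (st : Int × List Int), st.1 ≤ (l.foldl (pvBodyT A) st).1 := by
  intro l
  induction l with
  | nil => intro st; exact le_refl _
  | cons i t ih =>
    intro st
    simp only [List.foldl_cons]
    refine le_trans ?_ (ih (pvBodyT A st i))
    unfold pvBodyT
    split_ifs with h
    · omega
    · exact le_refl _

theorem pv_bodyT_fst_ge (A : List (Int × Int)) :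
    ∀ (l : List Int) (st : Int × List Int) (i : Int), i ∈ l →
      pvLenT A i ≤ (l.foldl (pvBodyT A) st).1 := by
  intro l
  induction l with
  | nil => intro st i hi; simp at hi
  | cons x t ih =>
    intro st i hi
    simp only [List.foldl_cons]
    rcases List.mem_cons.mp hi with rfl | hi'
    · refine le_trans ?_ (pv_bodyT_fst_mono A t (pvBodyT A st i))
      unfold pvBodyT
      split_ifs with h
      · exact le_refl _
      · omega
    · exact ih _ i hi'

theorem pv_bodyT_ne (A : List (Int × Int)) :
    ∀ (l : List Int) (st : Int × List Int), (0 < st.1 → st.2 ≠ []) →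
      (0 < (l.foldl (pvBodyT A) st).1 → (l.foldl (pvBodyT A) st).2 ≠ []) := by
  intro l
  induction l with
  | nil => intro st h; exact h
  | cons x t ih =>
    intro st h
    simp only [List.foldl_cons]
    apply ih
    unfold pvBodyT
    split_ifs with hcnd
    · intro _
      unfold pvSpansT
      simp
    · exact h

theorem pv_tight (A : List (Int × Int)) (k : Int) (hd : D_kintersect2 A k) :
    kintersect2 A k ≠ kintersect2_alt A k := by
  obtain ⟨hk, hne, w, hwA, hwlt⟩ := hd
  have hB : kintersect2_alt A k = [] := by
    unfold kintersect2_alt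
    rw [if_neg (by omega), if_pos (Or.inl (by omega))]
  rw [hB, pv_portA_nonpos_fold A k hk hne]
  obtain ⟨p, hpR, hstf, henf⟩ := pv_pair_surj A w hwA
  have hlen0 : A.length ≠ 0 := fun h => hne (List.length_eq_zero_iff.mp h)
  have hlastR : ((A.length : Int) - 1) ∈ pvR A := (pv_mem_R A _).mpr ⟨by omega, by omega⟩
  have hlastpair := pv_pair_mem A ((A.length : Int) - 1) hlastR
  have hwlast : w.1 < pvEnf A ((A.length : Int) - 1) := hwlt _ hlastpair
  have hwp : w.1 < pvEnf A p := by rw [henf]; exact hwlt w hwA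
  have hpos : 0 < pvLenT A p := by
    unfold pvLenT
    rw [hstf]
    omega
  have hfst := pv_bodyT_fst_ge A (pvR A) (0, []) p hpR
  have := pv_bodyT_ne A (pvR A) (0, []) (by intro hcon; exfalso; exact absurd hcon (by norm_num)) (by omega)
  exact this

-- ===== VERDICT (by name: the statement is the Claim_ definition above) =====
theorem kintersect2_spec : Claim_unchanged_kintersect2 := by
  intro A k _hdom
  unfold Spec_kintersect2
  intro hnd
  rcases Int.lt_or_le k 1 with hk | hk
  · exact pv_case_nonpos A k (by omega) hnd
  · rcases eq_or_lt_of_le hk with hk1 | hk2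
    · rw [← hk1]; exact pv_case_one A
    · rcases Int.lt_or_le (A.length : Int) k with hkn | hkn
      · exact pv_case_big A k (by omega) hkn
      · exact pv_case_main A k (by omega) hkn

theorem kintersect2_changed : Claim_changed_kintersect2 := by
  unfold Claim_changed_kintersect2; decide

theorem kintersect2_tight : Claim_exact_kintersect2 := by
  intro A k _hdom hd
  exact pv_tight A k hd
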